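-- pv_equiv track=rewrite | github.com/alpercanberk/2D_Genetic_Algorithm_Agents | graph.py | create_layers
-- ===== SOURCE A (Python) =====
-- def find_in_neurons(neuron, connections):
--     in_neurons = []
--     for connection in connections:
--         if connection[1] == neuron:
--             in_neurons.append(connection[0])
--     return in_neurons
--
-- def find_depth(neuron, connections, accumulator):
--     accumulator += 1
--     if len(find_in_neurons(neuron, connections))==0:
--         return accumulator
--
--     scores = []
--     for in_neuron in find_in_neurons(neuron, connections):
--         scores.append(find_depth(in_neuron, connections, accumulator))
--
--     return max(scores)
--
-- def find_network_depth(connections, input_neurons, output_neurons):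
--     accumulator = 0
--     return max([find_depth(output_neuron, connections, accumulator) for output_neuron in output_neurons])
--
-- def create_layers(neurons, connections, input_neurons, output_neurons):
--     layers = [[] for _ in range(find_network_depth(connections, input_neurons, output_neurons))]
--     for neuron in neurons:
--         accumulator = 0
--         if neuron in output_neurons:
--             index = len(layers)-1
--         elif neuron in input_neurons:
--             index = 0
--         else:
--             index = find_depth(neuron, connections, accumulator)-1
--         layers[index].append(neuron)
--     return layers
-- ===== SOURCE B (Python) =====
-- def create_layers(neurons, connections, input_neurons, output_neurons):
--     preds = {}
--     for a, b in connections: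
--         preds.setdefault(b, []).append(a)
--     memo = {}
--     def depth(n):
--         if n in memo:
--             return memo[n]
--         ps = preds.get(n, [])
--         d = 1 if not ps else 1 + max(depth(p) for p in ps)
--         memo[n] = d
--         return d
--     out_set = set(output_neurons)
--     in_set = set(input_neurons)
--     network_depth = max(depth(o) for o in output_neurons)
--     layers = [[] for _ in range(network_depth)]
--     for neuron in neurons:
--         if neuron in out_set:
--             index = network_depth - 1
--         elif neuron in in_set:
--             index = 0
--         else:
--             index = depth(neuron) - 1
--         layers[index].append(neuron)
--     return layers
-- ===== Notes on version B (the rewrite author's own statement) =====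
-- stated objective: faster
-- what changed: Intended as faster (probe measured 27.6x at n=1024 on the single comparable input): A recomputes each neuron's depth by a naive recursion that rescans the entire connection list at every step and scans the input/output lists per neuron; B builds a predecessor adjacency dict once, computes every depth once via a memoized depth function, and uses set-based input/output membership.
import Mathlib
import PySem

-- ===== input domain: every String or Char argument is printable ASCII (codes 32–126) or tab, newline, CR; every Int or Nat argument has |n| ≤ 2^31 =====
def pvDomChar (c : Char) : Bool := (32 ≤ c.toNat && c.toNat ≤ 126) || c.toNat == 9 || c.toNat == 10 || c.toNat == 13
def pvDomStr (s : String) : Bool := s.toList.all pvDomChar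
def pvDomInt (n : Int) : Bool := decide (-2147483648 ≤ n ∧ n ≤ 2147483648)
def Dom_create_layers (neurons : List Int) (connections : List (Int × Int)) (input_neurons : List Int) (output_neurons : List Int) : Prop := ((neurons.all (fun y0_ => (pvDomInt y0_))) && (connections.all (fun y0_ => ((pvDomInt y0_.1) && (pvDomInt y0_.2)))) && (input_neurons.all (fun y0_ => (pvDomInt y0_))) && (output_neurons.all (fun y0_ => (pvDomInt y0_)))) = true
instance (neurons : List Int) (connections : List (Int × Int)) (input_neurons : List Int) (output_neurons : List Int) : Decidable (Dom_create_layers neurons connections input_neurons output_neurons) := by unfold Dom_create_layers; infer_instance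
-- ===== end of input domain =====

-- B replaces A's repeated recursive longest-path search (which rescans the whole connection
-- list at every recursive step and scans the input/output lists per neuron) by a predecessor
-- adjacency dict built once, a memoized depth computation and set-based membership; intended
-- as faster (a timing run measured 27.6x at n=1024 on the one input A finished there).

-- ===== PORT A =====
def findInNeurons (neuron : Int) (connections : List (Int × Int)) : List Int :=
  (connections.filter (fun c => c.2 == neuron)).map (fun c => c.1)

-- literal transliteration of find_depth; the Nat fuel only makes the recursion total:
-- inside Pre_ it is never exhausted (none = the Python recursion does not terminate)
def findDepthA (connections : List (Int × Int)) : Nat → Int → Int → Option Int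
  | 0, _, _ => none
  | fuel+1, neuron, accumulator =>
    let acc := accumulator + 1
    if findInNeurons neuron connections = [] then some acc
    else
      match (findInNeurons neuron connections).mapM (fun p => findDepthA connections fuel p acc) with
      | none => none
      | some scores => PySem.List.max? scores (fun y => y)

def findNetworkDepthA (connections : List (Int × Int)) (input_neurons : List Int) (output_neurons : List Int) : Option Int :=
  match output_neurons.mapM (fun o => findDepthA connections (connections.length + 2) o 0) with
  | none => none
  | some ds => PySem.List.max? ds (fun y => y)

-- layers[index].append(neuron); none = IndexError (index is ≥ 0 whenever A reaches this, so
-- Python's negative-index wraparound never fires)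
def placeA (layers : List (List Int)) (index : Int) (neuron : Int) : Option (List (List Int)) :=
  if 0 ≤ index ∧ index < (layers.length : Int) then
    some (layers.set index.toNat ((layers.getD index.toNat []) ++ [neuron]))
  else none

def create_layers (neurons : List Int) (connections : List (Int × Int)) (input_neurons : List Int) (output_neurons : List Int) : List (List Int) :=
  (match findNetworkDepthA connections input_neurons output_neurons with
   | none => none
   | some nd =>
     -- range(find_network_depth(...)): nd ≥ 1 always holds here, so toNat is exact
     neurons.foldlM (fun layers neuron =>
       if output_neurons.contains neuron then placeA layers ((layers.length : Int) - 1) neuron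
       else if input_neurons.contains neuron then placeA layers 0 neuron
       else match findDepthA connections (connections.length + 2) neuron 0 with
            | none => none
            | some d => placeA layers (d - 1) neuron)
       (List.replicate nd.toNat ([] : List Int))
  ).getD []

-- ===== PORT B =====
-- preds.setdefault(b, []).append(a)
def buildPreds (connections : List (Int × Int)) : PySem.Dict Int (List Int) :=
  connections.foldl (fun d c => d.modify c.2 [] (fun l => l ++ [c.1])) PySem.Dict.empty

-- the 'depth(p) for p in ps' loop, threading the memo; rec is the recursive depth call
def depthGo (rec : Int → PySem.Dict Int Int → Option (Int × PySem.Dict Int Int)) :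
    List Int → PySem.Dict Int Int → Option (List Int × PySem.Dict Int Int)
  | [], memo => some ([], memo)
  | p :: rest, memo =>
    match rec p memo with
    | none => none
    | some (d, memo') =>
      match depthGo rec rest memo' with
      | none => none
      | some (ds, memo'') => some (d :: ds, memo'')

-- memoized depth; the Nat fuel only makes the recursion total (never exhausted inside Pre_)
def depthB (preds : PySem.Dict Int (List Int)) : Nat → Int → PySem.Dict Int Int → Option (Int × PySem.Dict Int Int)
  | 0 => fun _ _ => none
  | fuel+1 => fun n memo =>
    match memo.get? n with
    | some d => some (d, memo)
    | none =>
      match preds.getD n [] with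
      | [] => some (1, memo.insert n 1)
      | p :: ps =>
        match depthGo (depthB preds fuel) (p :: ps) memo with
        | none => none
        | some (vals, memo') =>
          match PySem.List.max? vals (fun y => y) with
          | none => none
          | some m => some (1 + m, memo'.insert n (1 + m))

def placeB (layers : List (List Int)) (index : Int) (neuron : Int) (memo : PySem.Dict Int Int) :
    Option (List (List Int) × PySem.Dict Int Int) :=
  if 0 ≤ index ∧ index < (layers.length : Int) then
    some (layers.set index.toNat ((layers.getD index.toNat []) ++ [neuron]), memo)
  else none

def create_layers_alt (neurons : List Int) (connections : List (Int × Int)) (input_neurons : List Int) (output_neurons : List Int) : List (List Int) :=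
  let preds := buildPreds connections
  let outSet := PySem.Set.ofList output_neurons
  let inSet := PySem.Set.ofList input_neurons
  (match depthGo (depthB preds (connections.length + 2)) output_neurons PySem.Dict.empty with
   | none => none
   | some (ds, memo0) =>
     match PySem.List.max? ds (fun y => y) with
     | none => none
     | some nd =>
       match neurons.foldlM (fun (st : List (List Int) × PySem.Dict Int Int) neuron =>
           if outSet.contains neuron then placeB st.1 (nd - 1) neuron st.2
           else if inSet.contains neuron then placeB st.1 0 neuron st.2
           else match depthB preds (connections.length + 2) neuron st.2 with
                | none => none
                | some (d, memo') => placeB st.1 (d - 1) neuron memo')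
         (List.replicate nd.toNat ([] : List Int), memo0) with
       | none => none
       | some (layers, _) => some layers
  ).getD []

-- ===== PRECONDITION & SPEC =====
-- level sets of the predecessor graph: inS i n ⟺ every chain of predecessors ending at n
-- has at most i edges (n is stratified within i+1 layers)
def inS (connections : List (Int × Int)) : Nat → Int → Bool
  | 0, n => findInNeurons n connections = []
  | i+1, n => (findInNeurons n connections).all (fun p => inS connections i p)

def lvlGo (connections : List (Int × Int)) (n : Int) : Nat → Nat → Nat
  | 0, i => i
  | b+1, i => if inS connections i n then i else lvlGo connections n b (i+1)

-- smallest level containing n (= longest predecessor chain ending at n)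
def lvlOf (connections : List (Int × Int)) (n : Int) : Nat :=
  lvlGo connections n (connections.length + 1) 0

def netDPre (connections : List (Int × Int)) (output_neurons : List Int) : Nat :=
  1 + (output_neurons.map (lvlOf connections)).foldl Nat.max 0

-- Pre_ excludes exactly the inputs on which A raises: ValueError (empty output_neurons),
-- unbounded recursion (a predecessor cycle reachable from a queried neuron), and IndexError
-- (a hidden neuron whose depth exceeds the network depth).
def Pre_create_layers (neurons : List Int) (connections : List (Int × Int)) (input_neurons : List Int) (output_neurons : List Int) : Prop :=
  output_neurons ≠ [] ∧
  (∀ o ∈ output_neurons, inS connections connections.length o = true) ∧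
  (∀ n ∈ neurons, n ∉ output_neurons → n ∉ input_neurons →
      inS connections (netDPre connections output_neurons - 1) n = true)

instance (neurons : List Int) (connections : List (Int × Int)) (input_neurons : List Int) (output_neurons : List Int) : Decidable (Pre_create_layers neurons connections input_neurons output_neurons) := by
  unfold Pre_create_layers; infer_instance

def pvWitness_create_layers : List Int × (List (Int × Int)) × List Int × List Int :=
  ([1, 2, 3], [(1, 2), (2, 3)], [1], [3])

def Spec_create_layers (neurons : List Int) (connections : List (Int × Int)) (input_neurons : List Int) (output_neurons : List Int) (out : List (List Int)) : Prop := out = create_layers_alt neurons connections input_neurons output_neurons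
instance (neurons : List Int) (connections : List (Int × Int)) (input_neurons : List Int) (output_neurons : List Int) (out : List (List Int)) : Decidable (Spec_create_layers neurons connections input_neurons output_neurons out) := by unfold Spec_create_layers; infer_instance

-- ===== CLAIM (what is proved, stated in full; the proofs are below) =====
def Claim_equal_create_layers : Prop := ∀ (neurons : List Int) (connections : List (Int × Int)) (input_neurons : List Int) (output_neurons : List Int), Dom_create_layers neurons connections input_neurons output_neurons → Pre_create_layers neurons connections input_neurons output_neurons → Spec_create_layers neurons connections input_neurons output_neurons (create_layers neurons connections input_neurons output_neurons)

-- ===== LEMMAS AND PROOFS =====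

theorem pv_inS_mono (c : List (Int × Int)) : ∀ i n, inS c i n = true → inS c (i+1) n = true := by
  intro i
  induction i with
  | zero =>
    intro n h
    simp only [inS, decide_eq_true_eq] at h
    simp [inS, h]
  | succ i ih =>
    intro n h
    rw [inS] at h ⊢
    rw [List.all_eq_true] at h ⊢
    intro p hp
    exact ih p (h p hp)

theorem pv_inS_le (c : List (Int × Int)) {i j : Nat} (h : i ≤ j) {n : Int}
    (hi : inS c i n = true) : inS c j n = true := by
  induction h with
  | refl => exact hi
  | step h ih => exact pv_inS_mono c _ n ih

theorem pv_foldl_max_le {b : Nat} : ∀ (vs : List Nat) (x : Nat), x ≤ b → (∀ v ∈ vs, v ≤ b) →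
    vs.foldl Nat.max x ≤ b := by
  intro vs
  induction vs with
  | nil => intro x hx _; simpa using hx
  | cons v t ih =>
    intro x hx hv
    simp only [List.foldl_cons]
    exact ih _ (by simp [hx, hv v (by simp)]) (fun u hu => hv u (by simp [hu]))

theorem pv_le_foldl_max : ∀ (vs : List Nat) (x : Nat), x ≤ vs.foldl Nat.max x := by
  intro vs
  induction vs with
  | nil => simp
  | cons v t ih =>
    intro x
    exact le_trans (Nat.le_max_left x v) (ih (Nat.max x v))

theorem pv_mem_le_foldl_max : ∀ (vs : List Nat) (x : Nat) (v : Nat), v ∈ vs → v ≤ vs.foldl Nat.max x := by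
  intro vs
  induction vs with
  | nil => simp
  | cons w t ih =>
    intro x v hv
    rcases List.mem_cons.mp hv with h | h
    · subst h
      exact le_trans (Nat.le_max_right x v) (pv_le_foldl_max t _)
    · exact ih _ v h

theorem pv_foldl_max_shift (a : Int) : ∀ (vs : List Nat) (x : Nat),
    (vs.map (fun (v : Nat) => a + (v : Int))).foldl max (a + (x : Int)) = a + ((vs.foldl Nat.max x : Nat) : Int) := by
  intro vs
  induction vs with
  | nil => simp
  | cons v t ih =>
    intro x
    simp only [List.map_cons, List.foldl_cons]
    have h : max (a + (x : Int)) (a + (v : Int)) = a + ((Nat.max x v : Nat) : Int) := by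
      push_cast
      exact max_add_add_left a (x : Int) (v : Int)
    rw [h]
    exact ih (Nat.max x v)

theorem pv_max?_shift (a : Int) (v : Nat) (vs : List Nat) :
    PySem.List.max? ((v :: vs).map (fun (u : Nat) => a + (u : Int))) (fun y => y) =
      some (a + ((vs.foldl Nat.max v : Nat) : Int)) := by
  rw [List.map_cons, PySem.List.max?_id_cons, pv_foldl_max_shift]

theorem pv_mapM_depth (c : List (Int × Int)) (i : Nat)
    (IH : ∀ n, inS c i n = true → ∃ v : Nat, 1 ≤ v ∧ v ≤ i + 1 ∧ inS c (v - 1) n = true ∧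
      ∀ f, i < f → ∀ acc : Int, findDepthA c f n acc = some (acc + v)) :
    ∀ ps : List Int, (∀ p ∈ ps, inS c i p = true) →
    ∃ vs : List Nat, vs.length = ps.length ∧
      (∀ v ∈ vs, 1 ≤ v ∧ v ≤ i + 1) ∧
      (∀ p ∈ ps, ∃ v ∈ vs, inS c (v - 1) p = true) ∧
      (∀ f, i < f → ∀ acc : Int,
        ps.mapM (fun p => findDepthA c f p acc) = some (vs.map (fun (v : Nat) => acc + (v : Int)))) := by
  intro ps
  induction ps with
  | nil =>
    intro _
    exact ⟨[], rfl, by simp, by simp, by intro f hf acc; simp⟩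
  | cons p rest ih =>
    intro hall
    obtain ⟨v, hv1, hv2, hv3, hv4⟩ := IH p (hall p (by simp))
    obtain ⟨vs, hlen, hbnd, hins, hmap⟩ := ih (fun q hq => hall q (by simp [hq]))
    refine ⟨v :: vs, by simp [hlen], ?_, ?_, ?_⟩
    · intro w hw
      rcases List.mem_cons.mp hw with h | h
      · subst h; exact ⟨hv1, hv2⟩
      · exact hbnd w h
    · intro q hq
      rcases List.mem_cons.mp hq with h | h
      · subst h; exact ⟨v, by simp, hv3⟩
      · obtain ⟨w, hw, hwq⟩ := hins q h
        exact ⟨w, by simp [hw], hwq⟩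
    · intro f hf acc
      rw [List.mapM_cons, hv4 f hf acc, hmap f hf acc]
      simp

theorem pv_findDepthA_of_inS (c : List (Int × Int)) : ∀ i n, inS c i n = true →
    ∃ v : Nat, 1 ≤ v ∧ v ≤ i + 1 ∧ inS c (v - 1) n = true ∧
      ∀ f, i < f → ∀ acc : Int, findDepthA c f n acc = some (acc + v) := by
  intro i
  induction i with
  | zero =>
    intro n h
    have hp : findInNeurons n c = [] := by simpa [inS] using h
    refine ⟨1, le_refl 1, by omega, by simpa [inS] using hp, ?_⟩
    intro f hf acc
    cases f with
    | zero => omega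
    | succ f' => simp [findDepthA, hp]
  | succ i ih =>
    intro n h
    by_cases hp : findInNeurons n c = []
    · refine ⟨1, le_refl 1, by omega, by simp [inS, hp], ?_⟩
      intro f hf acc
      cases f with
      | zero => omega
      | succ f' => simp [findDepthA, hp]
    · rw [inS, List.all_eq_true] at h
      obtain ⟨vs, hlen, hbnd, hins, hmap⟩ := pv_mapM_depth c i ih (findInNeurons n c) h
      cases hps : findInNeurons n c with
      | nil => exact absurd hps hp
      | cons p0 prest =>
        cases vs with
        | nil => rw [hps] at hlen; simp at hlen
        | cons v0 vrest =>
          set vmax := vrest.foldl Nat.max v0 with hvmax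
          have hv0 : 1 ≤ v0 := (hbnd v0 (by simp)).1
          have hvm1 : 1 ≤ vmax := le_trans hv0 (pv_le_foldl_max vrest v0)
          have hvmb : vmax ≤ i + 1 :=
            pv_foldl_max_le vrest v0 (hbnd v0 (by simp)).2 (fun u hu => (hbnd u (by simp [hu])).2)
          refine ⟨vmax + 1, by omega, by omega, ?_, ?_⟩
          · have : inS c ((vmax - 1) + 1) n = true := by
              rw [inS, List.all_eq_true]
              intro q hq
              obtain ⟨w, hw, hwq⟩ := hins q hq
              have hwle : w ≤ vmax := by
                rcases List.mem_cons.mp hw with h' | h'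
                · rw [h']; exact pv_le_foldl_max vrest v0
                · exact pv_mem_le_foldl_max vrest v0 w h'
              exact pv_inS_le c (by omega : w - 1 ≤ vmax - 1) hwq
            have he : (vmax + 1) - 1 = (vmax - 1) + 1 := by omega
            rw [he]
            exact this
          · intro f hf acc
            cases f with
            | zero => omega
            | succ f' =>
              have hm := hmap f' (by omega) (acc + 1)
              simp only [findDepthA, if_neg hp, hm]
              rw [pv_max?_shift (acc + 1) v0 vrest]
              congr 1
              push_cast
              ring

theorem pv_lvlGo_spec (c : List (Int × Int)) (n : Int) : ∀ b i, inS c (i + b) n = true →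
    (∀ j, j < i → inS c j n = false) →
    inS c (lvlGo c n b i) n = true ∧ ∀ j, j < lvlGo c n b i → inS c j n = false := by
  intro b
  induction b with
  | zero =>
    intro i h hmin
    simpa [lvlGo] using ⟨h, hmin⟩
  | succ b ih =>
    intro i h hmin
    rw [lvlGo]
    by_cases hc : inS c i n = true
    · rw [if_pos hc]
      exact ⟨hc, hmin⟩
    · rw [if_neg hc]
      refine ih (i + 1) (by rw [show i + 1 + b = i + (b + 1) by omega]; exact h) ?_
      intro j hj
      rcases Nat.lt_succ_iff_lt_or_eq.mp hj with h' | h'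
      · exact hmin j h'
      · subst h'
        revert hc
        cases inS c j n <;> simp

theorem pv_lvl_spec (c : List (Int × Int)) (n : Int) (h : inS c c.length n = true) :
    inS c (lvlOf c n) n = true ∧ lvlOf c n ≤ c.length ∧ ∀ j, j < lvlOf c n → inS c j n = false := by
  have h0 : inS c (0 + (c.length + 1)) n = true := by
    refine pv_inS_le c (by omega) h
  obtain ⟨h1, h2⟩ := pv_lvlGo_spec c n (c.length + 1) 0 h0 (by omega)
  refine ⟨h1, ?_, h2⟩
  by_contra hgt
  push_neg at hgt
  exact absurd h (by simp [h2 c.length hgt])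

-- the depth value A computes is exactly lvlOf + 1
theorem pv_findDepthA_lvl (c : List (Int × Int)) (n : Int) (h : inS c c.length n = true) :
    ∀ f, lvlOf c n < f → ∀ acc : Int,
      findDepthA c f n acc = some (acc + ((lvlOf c n + 1 : Nat) : Int)) := by
  obtain ⟨h1, h2, h3⟩ := pv_lvl_spec c n h
  obtain ⟨v, hv1, hv2, hv3, hv4⟩ := pv_findDepthA_of_inS c (lvlOf c n) n h1
  have hveq : v = lvlOf c n + 1 := by
    have : ¬ (v - 1 < lvlOf c n) := by
      intro hlt
      exact absurd hv3 (by simp [h3 _ hlt])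
    omega
  intro f hf acc
  rw [hv4 f hf acc, hveq]

theorem pv_getD_buildPreds_gen (c : List (Int × Int)) :
    ∀ (d : PySem.Dict Int (List Int)) (n : Int),
      (c.foldl (fun d e => d.modify e.2 [] (fun l => l ++ [e.1])) d).getD n [] =
        d.getD n [] ++ findInNeurons n c := by
  induction c with
  | nil => intro d n; simp [findInNeurons]
  | cons x rest ih =>
    intro d n
    rw [List.foldl_cons, ih]
    rw [PySem.Dict.getD_modify]
    by_cases hx : n = x.2
    · subst hx
      simp [findInNeurons, List.filter_cons, List.append_assoc]
    · simp only [if_neg hx]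
      have : findInNeurons n (x :: rest) = findInNeurons n rest := by
        simp [findInNeurons, List.filter_cons, Ne.symm hx]
      rw [this]

theorem pv_getD_buildPreds (c : List (Int × Int)) (n : Int) :
    (buildPreds c).getD n [] = findInNeurons n c := by
  rw [buildPreds, pv_getD_buildPreds_gen]
  simp

def InvMemo (c : List (Int × Int)) (memo : PySem.Dict Int Int) : Prop :=
  ∀ k d, memo.get? k = some d → findDepthA c (c.length + 2) k 0 = some d

theorem pv_InvMemo_empty (c : List (Int × Int)) : InvMemo c PySem.Dict.empty := by
  intro k d h
  simp [PySem.Dict.get?_empty] at h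

theorem pv_InvMemo_insert (c : List (Int × Int)) (memo : PySem.Dict Int Int) (n : Int) (d : Int)
    (hmem : InvMemo c memo) (hd : findDepthA c (c.length + 2) n 0 = some d) :
    InvMemo c (memo.insert n d) := by
  intro k e h
  rw [PySem.Dict.get?_insert] at h
  by_cases hk : k = n
  · simp only [if_pos hk] at h
    cases h
    rw [hk]
    exact hd
  · simp only [if_neg hk] at h
    exact hmem k e h

theorem pv_depthGo_spec (c : List (Int × Int)) (i : Nat)
    (rec : Int → PySem.Dict Int Int → Option (Int × PySem.Dict Int Int))
    (hrec : ∀ q memo, inS c i q = true → InvMemo c memo →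
      ∃ d memo', rec q memo = some (d, memo') ∧ findDepthA c (c.length + 2) q 0 = some d ∧ InvMemo c memo') :
    ∀ ps memo, (∀ p ∈ ps, inS c i p = true) → InvMemo c memo →
    ∃ ds memo', depthGo rec ps memo = some (ds, memo') ∧ InvMemo c memo' ∧
      List.Forall₂ (fun p d => findDepthA c (c.length + 2) p 0 = some d) ps ds := by
  intro ps
  induction ps with
  | nil =>
    intro memo _ hm
    exact ⟨[], memo, rfl, hm, List.Forall₂.nil⟩
  | cons p rest ih =>
    intro memo hall hm
    obtain ⟨d, memo', hrun, hval, hm'⟩ := hrec p memo (hall p (by simp)) hm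
    obtain ⟨ds, memo'', hrun2, hm'', hfa⟩ := ih memo' (fun q hq => hall q (by simp [hq])) hm'
    refine ⟨d :: ds, memo'', ?_, hm'', List.Forall₂.cons hval hfa⟩
    simp [depthGo, hrun, hrun2]

theorem pv_mapM_of_forall₂ (c : List (Int × Int)) (i : Nat) (hic : i ≤ c.length) :
    ∀ (ps : List Int) (ds : List Int), (∀ p ∈ ps, inS c i p = true) →
      List.Forall₂ (fun p d => findDepthA c (c.length + 2) p 0 = some d) ps ds →
      ps.mapM (fun p => findDepthA c (c.length + 1) p 1) = some (ds.map (fun d => 1 + d)) := by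
  intro ps ds hall hfa
  induction hfa with
  | nil => simp
  | @cons p d ps' ds' hpd _ ih =>
    obtain ⟨v, _, _, _, hv4⟩ := pv_findDepthA_of_inS c i p (hall p (by simp))
    have h0 : findDepthA c (c.length + 2) p 0 = some ((0 : Int) + v) := hv4 _ (by omega) 0
    have hd : d = (0 : Int) + v := by
      rw [hpd] at h0
      exact Option.some_inj.mp h0
    have h1 : findDepthA c (c.length + 1) p 1 = some ((1 : Int) + v) := hv4 _ (by omega) 1
    rw [List.mapM_cons, h1, ih (fun q hq => hall q (by simp [hq]))]
    simp [hd]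

theorem pv_foldl_max_add (a : Int) : ∀ (t : List Int) (x : Int),
    (t.map (fun u => a + u)).foldl max (a + x) = a + t.foldl max x := by
  intro t
  induction t with
  | nil => simp
  | cons v s ih =>
    intro x
    simp only [List.map_cons, List.foldl_cons]
    rw [max_add_add_left]
    exact ih (max x v)

theorem pv_max?_add (a : Int) (x : Int) (t : List Int) :
    PySem.List.max? ((x :: t).map (fun u => a + u)) (fun y => y) = some (a + t.foldl max x) := by
  rw [List.map_cons, PySem.List.max?_id_cons, pv_foldl_max_add]

theorem pv_depthB_spec (c : List (Int × Int)) : ∀ i, i ≤ c.length →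
    ∀ n memo f, inS c i n = true → InvMemo c memo → i < f →
    ∃ d memo', depthB (buildPreds c) f n memo = some (d, memo') ∧
      findDepthA c (c.length + 2) n 0 = some d ∧ InvMemo c memo' := by
  intro i
  induction i with
  | zero =>
    intro _ n memo f hn hm hf
    cases f with
    | zero => omega
    | succ f' =>
      rw [depthB]
      cases hget : memo.get? n with
      | some d => exact ⟨d, memo, by simp [hget], hm n d hget, hm⟩
      | none =>
        have hp : findInNeurons n c = [] := by simpa [inS] using hn
        have hval : findDepthA c (c.length + 2) n 0 = some 1 := by
          rw [show c.length + 2 = (c.length + 1) + 1 by omega, findDepthA]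
          simp [hp]
        refine ⟨1, memo.insert n 1, ?_, hval, pv_InvMemo_insert c memo n 1 hm hval⟩
        simp [hget, pv_getD_buildPreds, hp]
  | succ i ih =>
    intro hic n memo f hn hm hf
    cases f with
    | zero => omega
    | succ f' =>
      rw [depthB]
      cases hget : memo.get? n with
      | some d => exact ⟨d, memo, by simp [hget], hm n d hget, hm⟩
      | none =>
        simp only [hget, pv_getD_buildPreds]
        rw [inS, List.all_eq_true] at hn
        cases hps : findInNeurons n c with
        | nil =>
          have hval : findDepthA c (c.length + 2) n 0 = some 1 := by
            rw [show c.length + 2 = (c.length + 1) + 1 by omega, findDepthA]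
            simp [hps]
          exact ⟨1, memo.insert n 1, by simp, hval, pv_InvMemo_insert c memo n 1 hm hval⟩
        | cons p0 prest =>
          have hrec := ih (by omega) 
          obtain ⟨ds, memo', hrun, hm', hfa⟩ :=
            pv_depthGo_spec c i (depthB (buildPreds c) f')
              (fun q mm hq hmq => ih (by omega) q mm f' hq hmq (by omega))
              (p0 :: prest) memo (by rw [← hps]; intro p hp; exact hn p hp) hm
          cases ds with
          | nil => cases hfa
          | cons d0 drest =>
            have hmax : PySem.List.max? (d0 :: drest) (fun y => y) = some (drest.foldl max d0) :=
              PySem.List.max?_id_cons d0 drest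
            have hmapM : (p0 :: prest).mapM (fun p => findDepthA c (c.length + 1) p 1) =
                some ((d0 :: drest).map (fun d => 1 + d)) := by
              refine pv_mapM_of_forall₂ c i (by omega) _ _ ?_ hfa
              rw [← hps]; intro p hp; exact hn p hp
            have hval : findDepthA c (c.length + 2) n 0 = some (1 + drest.foldl max d0) := by
              rw [show c.length + 2 = (c.length + 1) + 1 by omega, findDepthA]
              simp only [hps, zero_add, hmapM, List.cons_ne_nil, if_false, reduceCtorEq,
                ite_false]
              exact pv_max?_add 1 d0 drest
            refine ⟨1 + drest.foldl max d0, memo'.insert n (1 + drest.foldl max d0), ?_, hval,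
              pv_InvMemo_insert c memo' n _ hm' hval⟩
            simp [hrun, hmax]


-- ==== network-depth and assembly glue ====

theorem pv_findDepthA_lvl0 (c : List (Int × Int)) (n : Int) (h : inS c c.length n = true) :
    findDepthA c (c.length + 2) n 0 = some (((lvlOf c n + 1 : Nat) : Int)) := by
  have hle : lvlOf c n ≤ c.length := (pv_lvl_spec c n h).2.1
  have := pv_findDepthA_lvl c n h (c.length + 2) (by omega) 0
  rw [this]
  simp

theorem pv_mapM_outputs (c : List (Int × Int)) :
    ∀ outs : List Int, (∀ o ∈ outs, inS c c.length o = true) →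
      outs.mapM (fun o => findDepthA c (c.length + 2) o 0) =
        some ((outs.map (fun o => lvlOf c o + 1)).map (fun (u : Nat) => (u : Int))) := by
  intro outs
  induction outs with
  | nil => intro _; simp
  | cons o rest ih =>
    intro hall
    rw [List.mapM_cons, pv_findDepthA_lvl0 c o (hall o (by simp)), ih (fun q hq => hall q (by simp [hq]))]
    simp

theorem pv_foldl_max_succ : ∀ (t : List Nat) (x : Nat),
    (t.map (fun u => u + 1)).foldl Nat.max (x + 1) = (t.foldl Nat.max x) + 1 := by
  intro t
  induction t with
  | nil => simp
  | cons v s ih =>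
    intro x
    simp only [List.map_cons, List.foldl_cons]
    have hsm : Nat.max (x + 1) (v + 1) = Nat.max x v + 1 := by
      rcases Nat.le_total x v with h | h
      · have a1 : Nat.max x v = v := Nat.max_eq_right h
        have a2 : Nat.max (x + 1) (v + 1) = v + 1 := Nat.max_eq_right (by omega)
        omega
      · have a1 : Nat.max x v = x := Nat.max_eq_left h
        have a2 : Nat.max (x + 1) (v + 1) = x + 1 := Nat.max_eq_left (by omega)
        omega
    rw [hsm]
    exact ih (Nat.max x v)

theorem pv_foldl_max_cast : ∀ (t : List Nat) (x : Nat),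
    (t.map (fun (u : Nat) => (u : Int))).foldl max ((x : Nat) : Int) = ((t.foldl Nat.max x : Nat) : Int) := by
  intro t
  induction t with
  | nil => simp
  | cons v s ih =>
    intro x
    simp only [List.map_cons, List.foldl_cons]
    rw [show max ((x : Nat) : Int) ((v : Nat) : Int) = ((Nat.max x v : Nat) : Int) by
      rw [Nat.cast_max]]
    exact ih (Nat.max x v)

theorem pv_max_lvl (c : List (Int × Int)) (o0 : Int) (orest : List Int)
    (hP2 : ∀ o ∈ o0 :: orest, inS c c.length o = true) :
    PySem.List.max? ((o0 :: orest).map (fun o => ((lvlOf c o + 1 : Nat) : Int))) (fun y => y) =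
      some ((netDPre c (o0 :: orest) : Nat) : Int) := by
  rw [show (o0 :: orest).map (fun o => ((lvlOf c o + 1 : Nat) : Int)) =
      ((o0 :: orest).map (fun o => lvlOf c o + 1)).map (fun (u : Nat) => (u : Int)) by
    rw [List.map_map]; rfl]
  rw [List.map_cons, List.map_cons, PySem.List.max?_id_cons, pv_foldl_max_cast]
  congr 2
  rw [netDPre, List.map_cons, List.foldl_cons]
  have hz : Nat.max 0 (lvlOf c o0) = lvlOf c o0 := Nat.max_eq_right (Nat.zero_le _)
  rw [hz]
  rw [show orest.map (fun o => lvlOf c o + 1) = (orest.map (lvlOf c)).map (fun u => u + 1) by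
    rw [List.map_map]; rfl]
  rw [pv_foldl_max_succ]
  omega

theorem pv_netA (c : List (Int × Int)) (ins : List Int) (outs : List Int) (hne : outs ≠ [])
    (hP2 : ∀ o ∈ outs, inS c c.length o = true) :
    findNetworkDepthA c ins outs = some ((netDPre c outs : Nat) : Int) := by
  cases outs with
  | nil => exact absurd rfl hne
  | cons o0 orest =>
    rw [findNetworkDepthA, pv_mapM_outputs c (o0 :: orest) hP2]
    show PySem.List.max? _ _ = _
    rw [List.map_map]
    exact pv_max_lvl c o0 orest hP2

theorem pv_forall₂_eq (c : List (Int × Int)) (g : Int → Int) :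
    ∀ (ps ds : List Int), List.Forall₂ (fun p d => findDepthA c (c.length + 2) p 0 = some d) ps ds →
      (∀ p ∈ ps, findDepthA c (c.length + 2) p 0 = some (g p)) → ds = ps.map g := by
  intro ps ds hfa
  induction hfa with
  | nil => intro _; rfl
  | @cons p d ps' ds' hpd _ ih =>
    intro hall
    have hg : d = g p := by
      have := hall p (by simp)
      rw [hpd] at this
      exact Option.some_inj.mp this
    rw [List.map_cons, ← hg, ih (fun q hq => hall q (by simp [hq]))]

theorem pv_netD_sub_le (c : List (Int × Int)) (outs : List Int)
    (hP2 : ∀ o ∈ outs, inS c c.length o = true) : netDPre c outs - 1 ≤ c.length := by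
  rw [netDPre]
  have : (outs.map (lvlOf c)).foldl Nat.max 0 ≤ c.length := by
    refine pv_foldl_max_le _ 0 (by omega) ?_
    intro v hv
    obtain ⟨o, ho, rfl⟩ := List.mem_map.mp hv
    exact (pv_lvl_spec c o (hP2 o ho)).2.1
  omega

theorem pv_contains_ofList (xs : List Int) (n : Int) :
    (PySem.Set.ofList xs).contains n = xs.contains n := by
  by_cases h : n ∈ xs
  · simp [List.contains_iff_mem, PySem.Set.mem_ofList, h]
  · simp [List.contains_iff_mem, PySem.Set.mem_ofList, h]

-- the two per-neuron placement folds agree, given the memo invariant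
theorem pv_fold_eq (c : List (Int × Int)) (ins outs : List Int)
    (hP2 : ∀ o ∈ outs, inS c c.length o = true) :
    ∀ (ns : List Int) (layers : List (List Int)) (memo : PySem.Dict Int Int),
      (∀ n ∈ ns, n ∉ outs → n ∉ ins → inS c (netDPre c outs - 1) n = true) →
      InvMemo c memo → layers.length = netDPre c outs →
      ∃ out : List (List Int),
        ns.foldlM (fun layers neuron =>
          if outs.contains neuron then placeA layers ((layers.length : Int) - 1) neuron
          else if ins.contains neuron then placeA layers 0 neuron
          else match findDepthA c (c.length + 2) neuron 0 with
               | none => none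
               | some d => placeA layers (d - 1) neuron) layers = some out ∧
        ∃ memo' : PySem.Dict Int Int,
          ns.foldlM (fun (st : List (List Int) × PySem.Dict Int Int) neuron =>
            if (PySem.Set.ofList outs).contains neuron then
              placeB st.1 (((netDPre c outs : Nat) : Int) - 1) neuron st.2
            else if (PySem.Set.ofList ins).contains neuron then placeB st.1 0 neuron st.2
            else match depthB (buildPreds c) (c.length + 2) neuron st.2 with
                 | none => none
                 | some (d, memo') => placeB st.1 (d - 1) neuron memo') (layers, memo) =
            some (out, memo') := by
  intro ns
  induction ns with
  | nil =>
    intro layers memo _ hm _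
    exact ⟨layers, by simp, memo, by simp⟩
  | cons n rest ih =>
    intro layers memo hall hm hlen
    have hnd1 : 1 ≤ netDPre c outs := by rw [netDPre]; omega
    have hndc : ((netDPre c outs : Nat) : Int) = (layers.length : Int) := by rw [hlen]
    have hnd1' : (1 : Int) ≤ (layers.length : Int) := by
      rw [← hndc]; exact_mod_cast hnd1
    have hrest : ∀ q ∈ rest, q ∉ outs → q ∉ ins → inS c (netDPre c outs - 1) q = true :=
      fun q hq => hall q (by simp [hq])
    by_cases hout : outs.contains n
    · have hidx : (0 : Int) ≤ (layers.length : Int) - 1 ∧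
          (layers.length : Int) - 1 < (layers.length : Int) := by omega
      have hpa : placeA layers ((layers.length : Int) - 1) n =
          some (layers.set ((layers.length : Int) - 1).toNat
            ((layers.getD ((layers.length : Int) - 1).toNat []) ++ [n])) := by
        rw [placeA, if_pos hidx]
      have hpb : placeB layers (((netDPre c outs : Nat) : Int) - 1) n memo =
          some (layers.set ((layers.length : Int) - 1).toNat
            ((layers.getD ((layers.length : Int) - 1).toNat []) ++ [n]), memo) := by
        rw [placeB, hndc, if_pos hidx]
      obtain ⟨out, hA, memo', hB⟩ := ih (layers.set ((layers.length : Int) - 1).toNat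
          ((layers.getD ((layers.length : Int) - 1).toNat []) ++ [n])) memo hrest hm
          (by rw [List.length_set]; exact hlen)
      refine ⟨out, ?_, memo', ?_⟩
      · rw [List.foldlM_cons, if_pos hout, hpa]
        exact hA
      · rw [List.foldlM_cons, if_pos (show (PySem.Set.ofList outs).contains n = true by
          rw [pv_contains_ofList]; exact hout), hpb]
        exact hB
    · by_cases hin : ins.contains n
      · have hidx : (0 : Int) ≤ (0 : Int) ∧ (0 : Int) < (layers.length : Int) := by omega
        have hpa : placeA layers 0 n =
            some (layers.set (0 : Int).toNat ((layers.getD (0 : Int).toNat []) ++ [n])) := by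
          rw [placeA, if_pos hidx]
        have hpb : placeB layers 0 n memo =
            some (layers.set (0 : Int).toNat ((layers.getD (0 : Int).toNat []) ++ [n]), memo) := by
          rw [placeB, if_pos hidx]
        obtain ⟨out, hA, memo', hB⟩ := ih (layers.set (0 : Int).toNat
            ((layers.getD (0 : Int).toNat []) ++ [n])) memo hrest hm
            (by rw [List.length_set]; exact hlen)
        refine ⟨out, ?_, memo', ?_⟩
        · rw [List.foldlM_cons, if_neg hout, if_pos hin, hpa]
          exact hA
        · rw [List.foldlM_cons,
            if_neg (show ¬ (PySem.Set.ofList outs).contains n = true by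
              rw [pv_contains_ofList]; exact hout),
            if_pos (show (PySem.Set.ofList ins).contains n = true by
              rw [pv_contains_ofList]; exact hin), hpb]
          exact hB
      · have hns : inS c (netDPre c outs - 1) n = true := by
          refine hall n (by simp) ?_ ?_
          · intro hmem; exact hout (List.contains_iff_mem.mpr hmem)
          · intro hmem; exact hin (List.contains_iff_mem.mpr hmem)
        have hic : netDPre c outs - 1 ≤ c.length := pv_netD_sub_le c outs hP2
        obtain ⟨v, hv1, hv2, _, hv4⟩ := pv_findDepthA_of_inS c (netDPre c outs - 1) n hns
        have hAv : findDepthA c (c.length + 2) n 0 = some ((0 : Int) + v) :=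
          hv4 (c.length + 2) (by omega) 0
        obtain ⟨d, memo1, hBrun, hBval, hm1⟩ :=
          pv_depthB_spec c (netDPre c outs - 1) hic n memo (c.length + 2) hns hm (by omega)
        have hdv : d = (0 : Int) + v := by
          rw [hAv] at hBval
          exact (Option.some_inj.mp hBval).symm
        subst hdv
        have hvnd : v ≤ netDPre c outs := by omega
        have hidx : (0 : Int) ≤ ((0 : Int) + v) - 1 ∧
            ((0 : Int) + v) - 1 < (layers.length : Int) := by
          have h1 : (1 : Int) ≤ (v : Int) := by exact_mod_cast hv1
          have h2 : ((v : Nat) : Int) ≤ ((netDPre c outs : Nat) : Int) := by exact_mod_cast hvnd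
          rw [hndc] at h2
          omega
        have hpa : placeA layers (((0 : Int) + v) - 1) n =
            some (layers.set (((0 : Int) + v) - 1).toNat
              ((layers.getD (((0 : Int) + v) - 1).toNat []) ++ [n])) := by
          rw [placeA, if_pos hidx]
        have hpb : placeB layers (((0 : Int) + v) - 1) n memo1 =
            some (layers.set (((0 : Int) + v) - 1).toNat
              ((layers.getD (((0 : Int) + v) - 1).toNat []) ++ [n]), memo1) := by
          rw [placeB, if_pos hidx]
        obtain ⟨out, hA, memo', hB⟩ := ih (layers.set (((0 : Int) + v) - 1).toNat
            ((layers.getD (((0 : Int) + v) - 1).toNat []) ++ [n])) memo1 hrest hm1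
            (by rw [List.length_set]; exact hlen)
        refine ⟨out, ?_, memo', ?_⟩
        · rw [List.foldlM_cons, if_neg hout, if_neg hin, hAv]
          show Option.bind (placeA layers (((0 : Int) + v) - 1) n) _ = _
          rw [hpa]
          exact hA
        · rw [List.foldlM_cons,
            if_neg (show ¬ (PySem.Set.ofList outs).contains n = true by
              rw [pv_contains_ofList]; exact hout),
            if_neg (show ¬ (PySem.Set.ofList ins).contains n = true by
              rw [pv_contains_ofList]; exact hin), hBrun]
          show Option.bind (placeB layers (((0 : Int) + v) - 1) n memo1) _ = _
          rw [hpb]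
          exact hB

-- ===== VERDICT (by name: the statement is the Claim_ definition above) =====
theorem create_layers_spec : Claim_equal_create_layers := by
  intro neurons c ins outs _ hPre
  obtain ⟨hne, hP2, hP3⟩ := hPre
  cases outs with
  | nil => exact absurd rfl hne
  | cons o0 orest =>
    have hrec : ∀ q memo, inS c c.length q = true → InvMemo c memo →
        ∃ d memo', depthB (buildPreds c) (c.length + 2) q memo = some (d, memo') ∧
          findDepthA c (c.length + 2) q 0 = some d ∧ InvMemo c memo' :=
      fun q memo hq hm => pv_depthB_spec c c.length (le_refl _) q memo (c.length + 2) hq hm (by omega)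
    obtain ⟨ds, memo0, hrun, hm0, hfa⟩ :=
      pv_depthGo_spec c c.length _ hrec (o0 :: orest) PySem.Dict.empty hP2 (pv_InvMemo_empty c)
    have hds : ds = (o0 :: orest).map (fun o => ((lvlOf c o + 1 : Nat) : Int)) :=
      pv_forall₂_eq c _ (o0 :: orest) ds hfa (fun o ho => pv_findDepthA_lvl0 c o (hP2 o ho))
    obtain ⟨out, hA, memo', hB⟩ := pv_fold_eq c ins (o0 :: orest) hP2 neurons
      (List.replicate (netDPre c (o0 :: orest)) ([] : List Int)) memo0 hP3 hm0 (by simp)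
    show create_layers neurons c ins (o0 :: orest) = create_layers_alt neurons c ins (o0 :: orest)
    rw [create_layers, create_layers_alt]
    simp only [pv_netA c ins (o0 :: orest) hne hP2, hrun, hds,
      pv_max_lvl c o0 orest hP2, Int.toNat_natCast, hA, hB, Option.getD_some]
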